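-- pv_equiv track=rewrite | github.com/seilk/Algorithm-PS | Programmers/모의고사.py | solution
-- ===== SOURCE A (Python) =====
-- from collections import deque
--
-- def solution(answers):
--     queue = deque(answers)
--     score = [0, 0, 0, 0]
--     p1 = deque([1, 2, 3, 4, 5])
--     p2 = deque([2, 1, 2, 3, 2, 4, 2, 5])
--     p3 = deque([3, 3, 1, 1, 2, 2, 4, 4, 5, 5])
--     pSet = [0, p1, p2, p3]
--     while queue:  # BFS
--         ans = queue.popleft()
--         for i in range(1, 4):
--             s = pSet[i].popleft()
--             score[i] += 1 if ans == s else 0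
--             pSet[i].append(s)
--
--     maxVal = max(score)
--     sol = []
--     for i, v in enumerate(score):
--         if i != 0 and maxVal == v:
--             sol.append(i)
--     sol.sort()
--     return sol
-- ===== SOURCE B (Python) =====
-- from collections import Counter
--
-- PATTERNS = [[1, 2, 3, 4, 5],
--             [2, 1, 2, 3, 2, 4, 2, 5],
--             [3, 3, 1, 1, 2, 2, 4, 4, 5, 5]]
--
--
-- def solution(answers):
--     # Histogram pass: answers are walked ONCE, without ever touching a pattern;
--     # only (position mod 40, value) frequencies are kept (40 = lcm of the
--     # three pattern periods).  Each score is then read off the histogram with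
--     # 40 lookups, independent of len(answers).
--     cnt = Counter((i % 40, a) for i, a in enumerate(answers))
--     scores = [sum(cnt[(j, p[j % len(p)])] for j in range(40)) for p in PATTERNS]
--     best = max(scores)
--     return [i + 1 for i, s in enumerate(scores) if s == best]
-- ===== Notes on version B (the rewrite author's own statement) =====
-- stated objective: alternative
-- what changed: Instead of rotating three deques against every answer, B builds a Counter histogram keyed by (index mod 40, answer) in a single pattern-free pass over the answers (40 = lcm of the pattern periods), then evaluates each supervisor's score with 40 histogram lookups against a fixed-period table; the argmax indices are taken from the three scores.
import Mathlib
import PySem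

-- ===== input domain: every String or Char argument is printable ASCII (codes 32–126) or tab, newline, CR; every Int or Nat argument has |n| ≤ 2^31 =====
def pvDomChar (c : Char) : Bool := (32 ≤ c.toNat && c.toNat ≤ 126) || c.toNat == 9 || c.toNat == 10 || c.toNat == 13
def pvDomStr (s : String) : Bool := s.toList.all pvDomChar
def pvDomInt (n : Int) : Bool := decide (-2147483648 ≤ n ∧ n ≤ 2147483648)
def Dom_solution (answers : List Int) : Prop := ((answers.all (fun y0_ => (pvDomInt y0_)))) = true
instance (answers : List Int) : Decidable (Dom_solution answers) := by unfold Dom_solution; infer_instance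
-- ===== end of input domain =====

-- B replaces A's per-answer rotation of three deques by a Counter histogram keyed by
-- (index mod 40, answer) built in one pattern-free pass, plus 40 lookups per score (alternative; same O(n) cost).

-- ===== PORT A =====
-- one deque step: popleft, compare, append back (deque is never empty on A's inputs; [] case is unreachable padding)
def stepA (a : Int) (p : List Int) : Int × List Int :=
  match p with
  | [] => (0, [])
  | h :: t => ((if a = h then 1 else 0), t ++ [h])

-- the 'while queue' loop: pop an answer, step all three pattern deques, accumulate scores 1..3
def loopA : List Int → Int × Int × Int → List Int → List Int → List Int → Int × Int × Int
  | [], s, _, _, _ => s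
  | a :: rest, s, p1, p2, p3 =>
      loopA rest (s.1 + (stepA a p1).1, s.2.1 + (stepA a p2).1, s.2.2 + (stepA a p3).1)
        (stepA a p1).2 (stepA a p2).2 (stepA a p3).2

def solution (answers : List Int) : List Int :=
  let s := loopA answers (0, 0, 0) [1,2,3,4,5] [2,1,2,3,2,4,2,5] [3,3,1,1,2,2,4,4,5,5]
  let score : List Int := [0, s.1, s.2.1, s.2.2]
  let maxVal := (PySem.List.max? score (fun x => x)).getD 0   -- max(score); score is nonempty so never none
  let sol := (PySem.List.enumerate score 0).foldl
      (fun acc iv => if iv.1 ≠ 0 ∧ maxVal = iv.2 then acc ++ [iv.1] else acc) []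
  PySem.List.sorted sol (fun x => x) false

-- ===== PORT B =====
-- Source B's Counter((i % 40, a) for i, a in enumerate(answers))
def keyB (answers : List Int) : List (Int × Int) :=
  (PySem.List.enumerate answers 0).map (fun q => (PySem.Int.mod q.1 40, q.2))

-- Source B's sum(cnt[(j, p[j % len(p)])] for j in range(40))
def scoreB (cnt : PySem.Dict (Int × Int) Int) (p : List Int) : Int :=
  ((PySem.List.pyRange 0 40 1).map
      (fun j => cnt.getD (j, PySem.List.pyGetD p (PySem.Int.mod j (p.length : Int)) 0) 0)).sum

def solution_alt (answers : List Int) : List Int :=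
  let cnt := PySem.Dict.counter (keyB answers)
  let scores : List Int :=
    [scoreB cnt [1,2,3,4,5], scoreB cnt [2,1,2,3,2,4,2,5], scoreB cnt [3,3,1,1,2,2,4,4,5,5]]
  let best := (PySem.List.max? scores (fun x => x)).getD 0   -- max(scores); nonempty
  ((PySem.List.enumerate scores 0).filter (fun q => q.2 == best)).map (fun q => q.1 + 1)

-- ===== PRECONDITION & SPEC =====
def Spec_solution (answers : List Int) (out : List Int) : Prop := out = solution_alt answers
instance (answers : List Int) (out : List Int) : Decidable (Spec_solution answers out) := by unfold Spec_solution; infer_instance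

-- ===== CLAIM =====
def Claim_equal_solution : Prop := ∀ (answers : List Int), Dom_solution answers → Spec_solution answers (solution answers)

-- ===== LEMMAS AND PROOFS =====

-- the common yardstick: number of i with answers[i] == p[(n+i) % len p], as a recursion
def scoreAux (p : List Int) : List Int → Nat → Int
  | [], _ => 0
  | a :: rest, i => (if a = p.getD (i % p.length) 0 then 1 else 0) + scoreAux p rest (i + 1)

-- single-pattern version of A's loop (A's loop is componentwise three of these)
def goA : List Int → Int → List Int → Int
  | [], s, _ => s
  | a :: rest, s, p => goA rest (s + (stepA a p).1) (stepA a p).2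

theorem loopA_eq_goA (as : List Int) : ∀ (s1 s2 s3 : Int) (p1 p2 p3 : List Int),
    loopA as (s1, s2, s3) p1 p2 p3 = (goA as s1 p1, goA as s2 p2, goA as s3 p3) := by
  induction as with
  | nil => intro _ _ _ _ _ _; rfl
  | cons a rest ih => intro s1 s2 s3 p1 p2 p3; simp [loopA, goA, ih]

theorem goA_rotate (p : List Int) (hp : p ≠ []) :
    ∀ (as : List Int) (n : Nat) (s : Int), goA as s (p.rotate n) = s + scoreAux p as n := by
  intro as
  induction as with
  | nil => intro n s; simp [goA, scoreAux]
  | cons a rest ih =>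
    intro n s
    have hlen : 0 < p.length := List.length_pos_iff.mpr hp
    have hmlt : n % p.length < p.length := Nat.mod_lt n hlen
    have hne : p.rotate n ≠ [] := by
      simp [List.rotate_eq_nil_iff]; exact hp
    obtain ⟨h, t, hht⟩ := List.exists_cons_of_ne_nil hne
    have hhead : h = p[n % p.length]'hmlt := by
      have := List.getElem_rotate p n 0 (by simp [hht])
      simpa [hht] using this
    have htail : t ++ [h] = p.rotate (n + 1) := by
      have hrr : (p.rotate n).rotate 1 = p.rotate (n + 1) := by
        rw [List.rotate_rotate]
      rw [← hrr, hht, List.rotate_cons_succ, List.rotate_zero]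
    have hgetD : p.getD (n % p.length) 0 = p[n % p.length]'hmlt :=
      List.getD_eq_getElem p 0 hmlt
    rw [hht]
    simp only [goA, stepA]
    rw [htail, ih, scoreAux, hgetD, ← hhead]
    split <;> ring

theorem scoreAux_nonneg (p : List Int) (as : List Int) : ∀ n, 0 ≤ scoreAux p as n := by
  induction as with
  | nil => intro n; simp [scoreAux]
  | cons a rest ih =>
    intro n
    have := ih (n + 1)
    simp only [scoreAux]
    split <;> omega

-- summing 'if j = m then g j else 0' over a duplicate-free list containing m picks out g m
theorem sum_map_ite_eq_zero {l : List Int} {m : Int} (hm : m ∉ l) (g : Int → Int) :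
    (l.map (fun j => if j = m then g j else 0)).sum = 0 := by
  induction l with
  | nil => rfl
  | cons h t ih =>
    simp only [List.mem_cons, not_or] at hm
    simp [List.map_cons, List.sum_cons, Ne.symm hm.1, ih hm.2]

theorem sum_map_ite_mem {l : List Int} (hn : l.Nodup) {m : Int} (hm : m ∈ l) (g : Int → Int) :
    (l.map (fun j => if j = m then g j else 0)).sum = g m := by
  induction l with
  | nil => cases hm
  | cons h t ih =>
    rcases List.mem_cons.mp hm with he | ht
    · subst he
      have : m ∉ t := (List.nodup_cons.mp hn).1
      simp [sum_map_ite_eq_zero this g]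
    · have hne : h ≠ m := by
        intro he; exact (List.nodup_cons.mp hn).1 (he ▸ ht)
      simp [hne, ih (List.nodup_cons.mp hn).2 ht]

-- the keys Source B feeds Counter, starting from index n
def keysFrom (as : List Int) (n : Nat) : List (Int × Int) :=
  (PySem.List.enumerate as (n : Int)).map (fun q => (PySem.Int.mod q.1 40, q.2))

theorem keyB_eq (answers : List Int) : keyB answers = keysFrom answers 0 := by
  simp [keyB, keysFrom]

theorem sum_counts_eq_scoreAux (p : List Int) (hp : p ≠ []) (hd : p.length ∣ 40)
    (as : List Int) : ∀ n : Nat,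
    ((PySem.List.pyRange 0 40 1).map
        (fun j => (((keysFrom as n).count
            (j, PySem.List.pyGetD p (PySem.Int.mod j (p.length : Int)) 0) : Nat) : Int))).sum
      = scoreAux p as n := by
  induction as with
  | nil => intro n; simp [keysFrom, scoreAux, PySem.List.enumerate]
  | cons a rest ih =>
    intro n
    have hlen : 0 < p.length := List.length_pos_iff.mpr hp
    have hcast : PySem.Int.mod (n : Int) 40 = ((n % 40 : Nat) : Int) := by
      exact_mod_cast PySem.Int.mod_natCast n 40
    have hkeys : keysFrom (a :: rest) n
        = (((n % 40 : Nat) : Int), a) :: keysFrom rest (n + 1) := by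
      simp only [keysFrom, PySem.List.enumerate_cons, List.map_cons, hcast]
      norm_num
    rw [hkeys]
    have hsplit : ∀ j : Int,
        ((((((n % 40 : Nat) : Int), a) :: keysFrom rest (n + 1)).count
            (j, PySem.List.pyGetD p (PySem.Int.mod j (p.length : Int)) 0) : Nat) : Int)
        = (((keysFrom rest (n + 1)).count
            (j, PySem.List.pyGetD p (PySem.Int.mod j (p.length : Int)) 0) : Nat) : Int)
          + (if j = ((n % 40 : Nat) : Int) then
              (if PySem.List.pyGetD p (PySem.Int.mod j (p.length : Int)) 0 = a then (1 : Int) else 0)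
             else 0) := by
      intro j
      rw [List.count_cons]
      push_cast
      congr 1
      split_ifs <;> simp_all
    calc ((PySem.List.pyRange 0 40 1).map
            (fun j => ((((((n % 40 : Nat) : Int), a) :: keysFrom rest (n + 1)).count
              (j, PySem.List.pyGetD p (PySem.Int.mod j (p.length : Int)) 0) : Nat) : Int))).sum
        = ((PySem.List.pyRange 0 40 1).map
            (fun j => (((keysFrom rest (n + 1)).count
              (j, PySem.List.pyGetD p (PySem.Int.mod j (p.length : Int)) 0) : Nat) : Int)
              + (if j = ((n % 40 : Nat) : Int) then
                  (if PySem.List.pyGetD p (PySem.Int.mod j (p.length : Int)) 0 = a then (1 : Int) else 0)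
                 else 0))).sum := by
            congr 1; exact List.map_congr_left (fun j _ => hsplit j)
      _ = scoreAux p rest (n + 1)
            + (if PySem.List.pyGetD p (PySem.Int.mod ((n % 40 : Nat) : Int) (p.length : Int)) 0 = a
               then (1 : Int) else 0) := by
            rw [PySem.List.sum_map_add_int, ih (n + 1)]
            congr 1
            have hnd : (PySem.List.pyRange 0 40 1).Nodup := by decide
            have hmem : ((n % 40 : Nat) : Int) ∈ PySem.List.pyRange 0 40 1 := by
              rw [PySem.List.mem_pyRange_one]
              have h40 : n % 40 < 40 := Nat.mod_lt n (by norm_num)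
              omega
            exact sum_map_ite_mem hnd hmem _
      _ = scoreAux p rest (n + 1) + (if a = p.getD (n % p.length) 0 then (1 : Int) else 0) := by
            have hmod : PySem.Int.mod ((n % 40 : Nat) : Int) (p.length : Int)
                = ((n % p.length : Nat) : Int) := by
              rw [PySem.Int.mod_natCast]
              norm_cast
              exact Nat.mod_mod_of_dvd n hd
            rw [hmod]
            have hget : PySem.List.pyGetD p ((n % p.length : Nat) : Int) 0
                = p.getD (n % p.length) 0 := by
              rw [PySem.List.pyGetD_natCast]
            rw [hget]
            congr 1
            simp [eq_comm]
      _ = scoreAux p (a :: rest) n := by rw [scoreAux]; ring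

theorem scoreB_eq (answers : List Int) (p : List Int) (hp : p ≠ []) (hd : p.length ∣ 40) :
    scoreB (PySem.Dict.counter (keyB answers)) p = scoreAux p answers 0 := by
  rw [scoreB, keyB_eq]
  rw [← sum_counts_eq_scoreAux p hp hd answers 0]
  congr 1
  exact List.map_congr_left (fun j _ => by rw [PySem.Dict.getD_counter])

-- ===== VERDICT =====
theorem solution_spec : Claim_equal_solution := by
  intro answers _
  unfold Spec_solution solution solution_alt
  have h1 := goA_rotate [1,2,3,4,5] (by simp) answers 0
  have h2 := goA_rotate [2,1,2,3,2,4,2,5] (by simp) answers 0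
  have h3 := goA_rotate [3,3,1,1,2,2,4,4,5,5] (by simp) answers 0
  simp only [List.rotate_zero] at h1 h2 h3
  rw [loopA_eq_goA, h1 0, h2 0, h3 0]
  dsimp only
  rw [scoreB_eq answers [1,2,3,4,5] (by simp) (by decide),
      scoreB_eq answers [2,1,2,3,2,4,2,5] (by simp) (by decide),
      scoreB_eq answers [3,3,1,1,2,2,4,4,5,5] (by simp) (by decide)]
  set S1 := scoreAux [1,2,3,4,5] answers 0 with hS1
  set S2 := scoreAux [2,1,2,3,2,4,2,5] answers 0 with hS2
  set S3 := scoreAux [3,3,1,1,2,2,4,4,5,5] answers 0 with hS3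
  have n1 : 0 ≤ S1 := scoreAux_nonneg _ _ 0
  have hmaxA : (PySem.List.max? [0, S1, S2, S3] (fun x => x)).getD 0 = max S1 (max S2 S3) := by
    rw [PySem.List.max?_id_cons]
    simp only [List.foldl, Option.getD_some]
    rw [max_eq_right n1, max_assoc]
  have hmaxB : (PySem.List.max? [S1, S2, S3] (fun x => x)).getD 0 = max S1 (max S2 S3) := by
    rw [PySem.List.max?_id_cons]
    simp only [List.foldl, Option.getD_some]
    rw [max_assoc]
  set B := max S1 (max S2 S3) with hB
  have e1 : (S1 = B) ↔ (B = S1) := eq_comm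
  have e2 : (S2 = B) ↔ (B = S2) := eq_comm
  have e3 : (S3 = B) ↔ (B = S3) := eq_comm
  simp only [zero_add, hmaxA, hmaxB, PySem.List.enumerate_cons, PySem.List.enumerate_nil,
    List.filter_cons, List.filter_nil, beq_iff_eq, List.foldl, e1, e2, e3]
  norm_num
  split_ifs <;> simp [PySem.List.sorted, PySem.List.insertBy]
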